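-- pv_equiv track=rewrite | github.com/zovulpes/KU-practice-2 | stage4/stage4.py | bfs_dependencies
-- ===== SOURCE A (Python) =====
-- from collections import defaultdict, deque
--
-- def bfs_dependencies(graph, start_pkg, max_depth=1000, filter_substring=""):
--     visited = set()
--     result = []
--     queue = deque()
--     queue.append((start_pkg, 0))
--     while queue:
--         node, depth = queue.popleft()
--         if node in visited:
--             continue
--         if filter_substring and filter_substring in node:
--             continue
--         visited.add(node)
--         result.append((node, depth))
--         if depth >= max_depth:
--             continue
--         for dep in graph.get(node, []):
--             queue.append((dep, depth + 1))
--     return result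
-- ===== SOURCE B (Python) =====
-- def bfs_dependencies(graph, start_pkg, max_depth=1000, filter_substring=""):
--     visited = set()
--     result = []
--     frontier = [start_pkg]
--     depth = 0
--     while frontier:
--         next_frontier = []
--         for node in frontier:
--             if node in visited:
--                 continue
--             if filter_substring and filter_substring in node:
--                 continue
--             visited.add(node)
--             result.append((node, depth))
--             if depth < max_depth:
--                 next_frontier.extend(graph.get(node, []))
--         frontier = next_frontier
--         depth += 1
--     return result
-- ===== Notes on version B (the rewrite author's own statement) =====
-- stated objective: alternative
-- what changed: Replaces the deque of (node, depth) pairs by a level-synchronous BFS: a frontier list per depth level with an inner loop building the next frontier, so no per-node depth bookkeeping in the queue.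
import Mathlib
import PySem

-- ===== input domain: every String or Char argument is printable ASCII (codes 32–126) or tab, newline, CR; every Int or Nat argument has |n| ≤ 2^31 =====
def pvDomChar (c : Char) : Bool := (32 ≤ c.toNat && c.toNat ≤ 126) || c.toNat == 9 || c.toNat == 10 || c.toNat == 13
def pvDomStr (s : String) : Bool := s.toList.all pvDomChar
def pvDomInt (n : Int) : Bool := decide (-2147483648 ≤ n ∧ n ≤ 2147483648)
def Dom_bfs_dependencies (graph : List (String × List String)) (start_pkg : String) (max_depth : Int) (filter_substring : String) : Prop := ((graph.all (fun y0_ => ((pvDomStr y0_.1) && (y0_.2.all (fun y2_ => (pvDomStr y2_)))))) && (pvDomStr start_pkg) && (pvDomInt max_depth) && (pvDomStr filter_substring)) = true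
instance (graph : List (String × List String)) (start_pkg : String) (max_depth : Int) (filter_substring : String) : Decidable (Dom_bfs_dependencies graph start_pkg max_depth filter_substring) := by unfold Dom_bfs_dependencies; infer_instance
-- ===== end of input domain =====

-- B replaces A's deque of (node, depth) pairs by a level-synchronous BFS (per-depth frontier lists); same return value, proved equal.


-- Ghost-measure helpers, used only by the termination arguments of the two loop ports.
-- pvUnvisited univ visited = how many elements of the fixed universe `univ` are not yet in `visited`.
def pvUnvisited (univ visited : List String) : Nat :=
  (univ.filter (fun x => !(PySem.Set.contains visited x))).length

theorem pvContains_add (s : List String) (n x : String) :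
    PySem.Set.contains (PySem.Set.add s n) x = ((x == n) || PySem.Set.contains s x) := by
  simp [pysem]; cases h : x == n <;> simp_all

theorem pvNotContains_add (visited : List String) (n : String) :
    ∀ x ∈ (univ : List String), (!(PySem.Set.contains (PySem.Set.add visited n) x))
      = ((!(x == n)) && (!(PySem.Set.contains visited x))) := by
  intro x _; rw [pvContains_add, Bool.not_or]

theorem pvUnvisited_add_le (univ visited : List String) (n : String) :
    pvUnvisited univ (PySem.Set.add visited n) ≤ pvUnvisited univ visited := by
  unfold pvUnvisited
  rw [List.filter_congr (pvNotContains_add visited n), ← List.filter_filter]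
  exact List.length_filter_le _ _

theorem pvUnvisited_add_lt (univ visited : List String) (n : String)
    (hmem : n ∈ univ) (hnv : PySem.Set.contains visited n = false) :
    pvUnvisited univ (PySem.Set.add visited n) < pvUnvisited univ visited := by
  unfold pvUnvisited
  rw [List.filter_congr (pvNotContains_add visited n), ← List.filter_filter]
  apply List.length_filter_lt_length_iff_exists.mpr
  refine ⟨n, List.mem_filter.mpr ⟨hmem, ?_⟩, by simp⟩
  simp only [Bool.not_eq_eq_eq_not, Bool.not_true]
  exact hnv

-- every dependency list delivered by graph.get(·, []) is contained in graph's value lists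
theorem pvMemGetD (g : List (String × List String)) (n x : String)
    (hx : x ∈ PySem.Dict.getD (PySem.Dict.mk g) n []) : x ∈ g.flatMap (fun p => p.2) := by
  induction g with
  | nil => simp [pysem] at hx
  | cons hd tl ih =>
    obtain ⟨k, v⟩ := hd
    rw [PySem.Dict.getD_eq_get?_getD, PySem.Dict.get?_mk_cons] at hx
    by_cases hk : (k == n) = true
    · simp only [hk] at hx
      simp only [List.flatMap_cons, List.mem_append]
      exact Or.inl hx
    · rw [Bool.not_eq_true] at hk
      rw [hk] at hx
      simp only [if_neg (by simp : ¬ (false = true))] at hx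
      rw [← PySem.Dict.getD_eq_get?_getD] at hx
      simp only [List.flatMap_cons, List.mem_append]
      exact Or.inr (ih hx)

theorem pvUnivHG (graph : List (String × List String)) (start_pkg : String) :
    ∀ (n x : String), x ∈ PySem.Dict.getD (PySem.Dict.mk graph) n [] →
      x ∈ start_pkg :: graph.flatMap (fun p => p.2) :=
  fun n x hx => List.mem_cons_of_mem _ (pvMemGetD graph n x hx)

-- ===== PORT A =====
-- the while-queue loop of A; univ/hg/hq are ghost arguments carrying the termination invariant
def bfsLoopA (graph : List (String × List String)) (max_depth : Int) (filter_substring : String)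
    (univ : List String)
    (hg : ∀ (n x : String), x ∈ PySem.Dict.getD (PySem.Dict.mk graph) n [] → x ∈ univ)
    (visited : PySem.Set String) (result : List (String × Int))
    (queue : List (String × Int))
    (hq : ∀ p ∈ queue, p.1 ∈ univ) : List (String × Int) :=
  match queue with
  | [] => result
  | (node, depth) :: rest =>
    if hv : PySem.Set.contains visited node then
      bfsLoopA graph max_depth filter_substring univ hg visited result rest
        (fun p hp => hq p (List.mem_cons_of_mem _ hp))
    else if (!(filter_substring == "")) && PySem.Str.isIn filter_substring node then
      bfsLoopA graph max_depth filter_substring univ hg visited result rest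
        (fun p hp => hq p (List.mem_cons_of_mem _ hp))
    else if depth ≥ max_depth then
      bfsLoopA graph max_depth filter_substring univ hg (PySem.Set.add visited node)
        (result ++ [(node, depth)]) rest
        (fun p hp => hq p (List.mem_cons_of_mem _ hp))
    else
      bfsLoopA graph max_depth filter_substring univ hg (PySem.Set.add visited node)
        (result ++ [(node, depth)])
        (rest ++ (PySem.Dict.getD (PySem.Dict.mk graph) node []).map (fun dep => (dep, depth + 1)))
        (by
          intro p hp
          rcases List.mem_append.mp hp with h | h
          · exact hq p (List.mem_cons_of_mem _ h)
          · obtain ⟨dep, hdep, rfl⟩ := List.mem_map.mp h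
            exact hg node dep hdep)
termination_by (pvUnvisited univ visited, queue.length)
decreasing_by
  · exact Prod.Lex.right _ (by simp)
  · exact Prod.Lex.right _ (by simp)
  · exact Prod.Lex.left _ _ (pvUnvisited_add_lt univ visited node
      (hq (node, depth) List.mem_cons_self) (Bool.eq_false_iff.mpr hv))
  · exact Prod.Lex.left _ _ (pvUnvisited_add_lt univ visited node
      (hq (node, depth) List.mem_cons_self) (Bool.eq_false_iff.mpr hv))

def bfs_dependencies (graph : List (String × List String)) (start_pkg : String) (max_depth : Int) (filter_substring : String) : List (String × Int) :=
  bfsLoopA graph max_depth filter_substring (start_pkg :: graph.flatMap (fun p => p.2))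
    (pvUnivHG graph start_pkg) PySem.Set.empty [] [(start_pkg, 0)]
    (fun p hp => by simp at hp; simp [hp])

-- ===== PORT B =====
-- the inner `for node in frontier` loop of B: consumes the level, accumulating next_frontier
def processLevel (graph : List (String × List String)) (max_depth : Int) (filter_substring : String)
    (visited : PySem.Set String) (result : List (String × Int)) (next_frontier : List String)
    (frontier : List String) (depth : Int) :
    PySem.Set String × List (String × Int) × List String :=
  match frontier with
  | [] => (visited, result, next_frontier)
  | node :: rest =>
    if PySem.Set.contains visited node then
      processLevel graph max_depth filter_substring visited result next_frontier rest depth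
    else if (!(filter_substring == "")) && PySem.Str.isIn filter_substring node then
      processLevel graph max_depth filter_substring visited result next_frontier rest depth
    else
      processLevel graph max_depth filter_substring (PySem.Set.add visited node)
        (result ++ [(node, depth)])
        (if depth < max_depth then
           next_frontier ++ PySem.Dict.getD (PySem.Dict.mk graph) node []
         else next_frontier)
        rest depth

theorem processLevel_visited_le (graph : List (String × List String)) (max_depth : Int)
    (filter_substring : String) (univ : List String) (frontier : List String) :
    ∀ visited result next_frontier depth,
      pvUnvisited univ (processLevel graph max_depth filter_substring visited result next_frontier frontier depth).1
        ≤ pvUnvisited univ visited := by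
  induction frontier with
  | nil => intro v r nf d; simp [processLevel]
  | cons node rest ih =>
    intro v r nf d
    rw [processLevel]
    split
    · exact ih v r nf d
    · split
      · exact ih v r nf d
      · exact le_trans (ih _ _ _ d) (pvUnvisited_add_le univ v node)

theorem processLevel_progress (graph : List (String × List String)) (max_depth : Int)
    (filter_substring : String) (univ : List String) (frontier : List String) :
    ∀ visited result next_frontier depth, (∀ n ∈ frontier, n ∈ univ) →
      (let T := processLevel graph max_depth filter_substring visited result next_frontier frontier depth
       (T.1 = visited ∧ T.2.2 = next_frontier) ∨ pvUnvisited univ T.1 < pvUnvisited univ visited) := by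
  induction frontier with
  | nil => intro v r nf d _; left; simp [processLevel]
  | cons node rest ih =>
    intro v r nf d hf
    rw [processLevel]
    split
    · exact ih v r nf d (fun n hn => hf n (List.mem_cons_of_mem _ hn))
    · split
      · exact ih v r nf d (fun n hn => hf n (List.mem_cons_of_mem _ hn))
      · right
        calc pvUnvisited univ (processLevel graph max_depth filter_substring
                (PySem.Set.add v node) (r ++ [(node, d)]) _ rest d).1
            ≤ pvUnvisited univ (PySem.Set.add v node) := processLevel_visited_le _ _ _ _ rest _ _ _ _
          _ < pvUnvisited univ v := by
              rename_i hv _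
              exact pvUnvisited_add_lt univ v node (hf node List.mem_cons_self)
                (Bool.eq_false_iff.mpr hv)

theorem processLevel_frontier_mem (graph : List (String × List String)) (max_depth : Int)
    (filter_substring : String) (univ : List String)
    (hg : ∀ (n x : String), x ∈ PySem.Dict.getD (PySem.Dict.mk graph) n [] → x ∈ univ)
    (frontier : List String) :
    ∀ visited result next_frontier depth, (∀ x ∈ next_frontier, x ∈ univ) →
      ∀ x ∈ (processLevel graph max_depth filter_substring visited result next_frontier frontier depth).2.2, x ∈ univ := by
  induction frontier with
  | nil => intro v r nf d hnf; simpa [processLevel] using hnf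
  | cons node rest ih =>
    intro v r nf d hnf
    rw [processLevel]
    split
    · exact ih v r nf d hnf
    · split
      · exact ih v r nf d hnf
      · apply ih
        intro x hx
        split at hx
        · rcases List.mem_append.mp hx with h | h
          · exact hnf x h
          · exact hg node x h
        · exact hnf x hx

-- the outer `while frontier` loop of B
def bfsLoopB (graph : List (String × List String)) (max_depth : Int) (filter_substring : String)
    (univ : List String)
    (hg : ∀ (n x : String), x ∈ PySem.Dict.getD (PySem.Dict.mk graph) n [] → x ∈ univ)
    (visited : PySem.Set String) (result : List (String × Int))
    (frontier : List String) (depth : Int)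
    (hf : ∀ n ∈ frontier, n ∈ univ) : List (String × Int) :=
  match frontier with
  | [] => result
  | node :: rest =>
    bfsLoopB graph max_depth filter_substring univ hg
      (processLevel graph max_depth filter_substring visited result [] (node :: rest) depth).1
      (processLevel graph max_depth filter_substring visited result [] (node :: rest) depth).2.1
      (processLevel graph max_depth filter_substring visited result [] (node :: rest) depth).2.2
      (depth + 1)
      (processLevel_frontier_mem graph max_depth filter_substring univ hg (node :: rest)
        visited result [] depth (by intro x hx; simp at hx))
termination_by 2 * pvUnvisited univ visited + (if frontier.isEmpty then 0 else 1)
decreasing_by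
  rcases processLevel_progress graph max_depth filter_substring univ (node :: rest)
      visited result [] depth hf with ⟨h1, h2⟩ | hlt
  · rw [h1, h2]; simp
  · have hsplit : (if (processLevel graph max_depth filter_substring visited result []
        (node :: rest) depth).2.2.isEmpty then 0 else 1) ≤ 1 := by split <;> omega
    simp only [List.isEmpty_cons]
    omega

def bfs_dependencies_alt (graph : List (String × List String)) (start_pkg : String) (max_depth : Int) (filter_substring : String) : List (String × Int) :=
  bfsLoopB graph max_depth filter_substring (start_pkg :: graph.flatMap (fun p => p.2))
    (pvUnivHG graph start_pkg) PySem.Set.empty [] [start_pkg] 0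
    (fun n hn => by simp at hn; simp [hn])

-- ===== PRECONDITION & SPEC =====
def Spec_bfs_dependencies (graph : List (String × List String)) (start_pkg : String) (max_depth : Int) (filter_substring : String) (out : List (String × Int)) : Prop := out = bfs_dependencies_alt graph start_pkg max_depth filter_substring
instance (graph : List (String × List String)) (start_pkg : String) (max_depth : Int) (filter_substring : String) (out : List (String × Int)) : Decidable (Spec_bfs_dependencies graph start_pkg max_depth filter_substring out) := by unfold Spec_bfs_dependencies; infer_instance

-- ===== CLAIM (what is proved, stated in full; the proofs are below) =====
def Claim_equal_bfs_dependencies : Prop := ∀ (graph : List (String × List String)) (start_pkg : String) (max_depth : Int) (filter_substring : String), Dom_bfs_dependencies graph start_pkg max_depth filter_substring → Spec_bfs_dependencies graph start_pkg max_depth filter_substring (bfs_dependencies graph start_pkg max_depth filter_substring)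

-- ===== LEMMAS AND PROOFS =====

-- membership helpers for the ghost invariant of the queue/frontier
theorem pvQmem (univ : List String) (f p : List String) (d : Int)
    (hf : ∀ n ∈ f, n ∈ univ) (hp : ∀ n ∈ p, n ∈ univ) :
    ∀ q ∈ f.map (fun n => (n, d)) ++ p.map (fun n => (n, d + 1)), q.1 ∈ univ := by
  intro q hq
  rcases List.mem_append.mp hq with h | h
  · obtain ⟨x, hx, rfl⟩ := List.mem_map.mp h; exact hf x hx
  · obtain ⟨x, hx, rfl⟩ := List.mem_map.mp h; exact hp x hx

theorem pvQmem1 (univ : List String) (p : List String) (d : Int)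
    (hp : ∀ n ∈ p, n ∈ univ) :
    ∀ q ∈ p.map (fun n => (n, d)), q.1 ∈ univ := by
  intro q hq
  obtain ⟨x, hx, rfl⟩ := List.mem_map.mp hq; exact hp x hx

-- proof-irrelevant congruence in the state arguments of A's loop
theorem bfsLoopA_congr (graph : List (String × List String)) (max_depth : Int) (filter_substring : String)
    (univ : List String) (hg : ∀ (n x : String), x ∈ PySem.Dict.getD (PySem.Dict.mk graph) n [] → x ∈ univ)
    {visited visited' : PySem.Set String} {result result' : List (String × Int)}
    {q q' : List (String × Int)}
    (h1 : visited = visited') (h2 : result = result') (h3 : q = q')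
    (hq : ∀ p ∈ q, p.1 ∈ univ) (hq' : ∀ p ∈ q', p.1 ∈ univ) :
    bfsLoopA graph max_depth filter_substring univ hg visited result q hq
      = bfsLoopA graph max_depth filter_substring univ hg visited' result' q' hq' := by
  subst h1; subst h2; subst h3; rfl

-- A's loop consuming one whole level (queue = frontier at depth d ++ pending at depth d+1)
-- lands exactly in the state processLevel computes.
theorem pvLevel (graph : List (String × List String)) (max_depth : Int) (filter_substring : String)
    (univ : List String) (hg : ∀ (n x : String), x ∈ PySem.Dict.getD (PySem.Dict.mk graph) n [] → x ∈ univ)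
    (f : List String) :
    ∀ (p : List String) (visited : PySem.Set String) (result : List (String × Int)) (d : Int)
      (hf : ∀ n ∈ f, n ∈ univ) (hp : ∀ n ∈ p, n ∈ univ),
      bfsLoopA graph max_depth filter_substring univ hg visited result
        (f.map (fun n => (n, d)) ++ p.map (fun n => (n, d + 1))) (pvQmem univ f p d hf hp)
      = bfsLoopA graph max_depth filter_substring univ hg
          (processLevel graph max_depth filter_substring visited result p f d).1
          (processLevel graph max_depth filter_substring visited result p f d).2.1
          (((processLevel graph max_depth filter_substring visited result p f d).2.2).map (fun n => (n, d + 1)))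
          (pvQmem1 univ _ (d + 1)
            (processLevel_frontier_mem graph max_depth filter_substring univ hg f visited result p d hp)) := by
  induction f with
  | nil =>
    intro p v r d hf hp
    exact bfsLoopA_congr graph max_depth filter_substring univ hg rfl rfl (by simp [processLevel]) _ _
  | cons node rest ih =>
    intro p v r d hf hp
    have hfr : ∀ n ∈ rest, n ∈ univ := fun n hn => hf n (List.mem_cons_of_mem _ hn)
    have pf1 : ∀ q ∈ ((node, d) :: (rest.map (fun n => (n, d)) ++ p.map (fun n => (n, d + 1)))), q.1 ∈ univ := by
      intro q hqq
      rcases List.mem_cons.mp hqq with h | h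
      · subst h; exact hf node List.mem_cons_self
      · exact pvQmem univ rest p d hfr hp q h
    refine (bfsLoopA_congr graph max_depth filter_substring univ hg rfl rfl (by simp) _ pf1).trans ?_
    conv_lhs => rw [bfsLoopA.eq_def]
    dsimp only
    split_ifs with hv hfil hd
    · -- node already visited: both sides skip it
      have hT : processLevel graph max_depth filter_substring v r p (node :: rest) d
          = processLevel graph max_depth filter_substring v r p rest d := by
        rw [processLevel.eq_def]; dsimp only; rw [if_pos hv]
      exact (ih p v r d hfr hp).trans
        (bfsLoopA_congr graph max_depth filter_substring univ hg
          (congrArg Prod.fst hT).symm (congrArg (fun t => t.2.1) hT).symm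
          (congrArg (fun t => List.map (fun n => (n, d + 1)) t.2.2) hT).symm _ _)
    · -- node filtered out: both sides skip it
      have hT : processLevel graph max_depth filter_substring v r p (node :: rest) d
          = processLevel graph max_depth filter_substring v r p rest d := by
        rw [processLevel.eq_def]; dsimp only; rw [if_neg hv, if_pos hfil]
      exact (ih p v r d hfr hp).trans
        (bfsLoopA_congr graph max_depth filter_substring univ hg
          (congrArg Prod.fst hT).symm (congrArg (fun t => t.2.1) hT).symm
          (congrArg (fun t => List.map (fun n => (n, d + 1)) t.2.2) hT).symm _ _)
    · -- node visited now, depth cap reached: no children enqueued on either side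
      have hT : processLevel graph max_depth filter_substring v r p (node :: rest) d
          = processLevel graph max_depth filter_substring (PySem.Set.add v node)
              (r ++ [(node, d)]) p rest d := by
        rw [processLevel.eq_def]; dsimp only
        rw [if_neg hv, if_neg hfil, if_neg (by omega : ¬ d < max_depth)]
      exact (ih p (PySem.Set.add v node) (r ++ [(node, d)]) d hfr hp).trans
        (bfsLoopA_congr graph max_depth filter_substring univ hg
          (congrArg Prod.fst hT).symm (congrArg (fun t => t.2.1) hT).symm
          (congrArg (fun t => List.map (fun n => (n, d + 1)) t.2.2) hT).symm _ _)
    · -- node visited now, children enqueued / appended to next_frontier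
      have hlt : d < max_depth := by omega
      have hp' : ∀ n ∈ p ++ PySem.Dict.getD (PySem.Dict.mk graph) node [], n ∈ univ := by
        intro n hn
        rcases List.mem_append.mp hn with h | h
        · exact hp n h
        · exact hg node n h
      have hT : processLevel graph max_depth filter_substring v r p (node :: rest) d
          = processLevel graph max_depth filter_substring (PySem.Set.add v node)
              (r ++ [(node, d)]) (p ++ PySem.Dict.getD (PySem.Dict.mk graph) node []) rest d := by
        rw [processLevel.eq_def]; dsimp only
        rw [if_neg hv, if_neg hfil, if_pos hlt]
      refine (bfsLoopA_congr graph max_depth filter_substring univ hg rfl rfl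
          (by simp [List.map_append]) _
          (pvQmem univ rest (p ++ PySem.Dict.getD (PySem.Dict.mk graph) node []) d hfr hp')).trans ?_
      exact (ih (p ++ PySem.Dict.getD (PySem.Dict.mk graph) node [])
            (PySem.Set.add v node) (r ++ [(node, d)]) d hfr hp').trans
        (bfsLoopA_congr graph max_depth filter_substring univ hg
          (congrArg Prod.fst hT).symm (congrArg (fun t => t.2.1) hT).symm
          (congrArg (fun t => List.map (fun n => (n, d + 1)) t.2.2) hT).symm _ _)

-- proof-irrelevant congruence in the state arguments of B's loop
theorem bfsLoopB_congr (graph : List (String × List String)) (max_depth : Int) (filter_substring : String)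
    (univ : List String) (hg : ∀ (n x : String), x ∈ PySem.Dict.getD (PySem.Dict.mk graph) n [] → x ∈ univ)
    {visited visited' : PySem.Set String} {result result' : List (String × Int)}
    {f f' : List String} (d : Int)
    (h1 : visited = visited') (h2 : result = result') (h3 : f = f')
    (hf : ∀ n ∈ f, n ∈ univ) (hf' : ∀ n ∈ f', n ∈ univ) :
    bfsLoopB graph max_depth filter_substring univ hg visited result f d hf
      = bfsLoopB graph max_depth filter_substring univ hg visited' result' f' d hf' := by
  subst h1; subst h2; subst h3; rfl

-- the main correspondence: A's queue loop started on a pure level equals B's outer loop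
theorem pvMain (graph : List (String × List String)) (max_depth : Int) (filter_substring : String)
    (univ : List String) (hg : ∀ (n x : String), x ∈ PySem.Dict.getD (PySem.Dict.mk graph) n [] → x ∈ univ) :
    ∀ (c : Nat) (visited : PySem.Set String), pvUnvisited univ visited = c →
    ∀ (p : List String) (result : List (String × Int)) (d : Int)
      (hq : ∀ q ∈ p.map (fun n => (n, d)), q.1 ∈ univ) (hf : ∀ n ∈ p, n ∈ univ),
      bfsLoopA graph max_depth filter_substring univ hg visited result (p.map (fun n => (n, d))) hq
      = bfsLoopB graph max_depth filter_substring univ hg visited result p d hf := by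
  intro c
  induction c using Nat.strong_induction_on with
  | _ c ih =>
    intro v hc p r d hq hf
    match p with
    | [] =>
      rw [bfsLoopA.eq_def, bfsLoopB.eq_def]
      rfl
    | node :: rest =>
      have hT2 : ∀ x ∈ (processLevel graph max_depth filter_substring v r [] (node :: rest) d).2.2, x ∈ univ :=
        processLevel_frontier_mem graph max_depth filter_substring univ hg (node :: rest)
          v r [] d (by intro x hx; simp at hx)
      refine (bfsLoopA_congr graph max_depth filter_substring univ hg rfl rfl
          (by simp) _ (pvQmem univ (node :: rest) [] d hf (by intro n hn; simp at hn))).trans ?_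
      refine (pvLevel graph max_depth filter_substring univ hg (node :: rest) [] v r d hf
          (by intro n hn; simp at hn)).trans ?_
      conv_rhs => rw [bfsLoopB.eq_def]
      dsimp only
      rcases processLevel_progress graph max_depth filter_substring univ (node :: rest)
          v r [] d hf with ⟨h1, h2⟩ | hlt
      · have hL : bfsLoopA graph max_depth filter_substring univ hg
            (processLevel graph max_depth filter_substring v r [] (node :: rest) d).1
            (processLevel graph max_depth filter_substring v r [] (node :: rest) d).2.1
            (((processLevel graph max_depth filter_substring v r [] (node :: rest) d).2.2).map (fun n => (n, d + 1)))
            (pvQmem1 univ _ (d + 1) hT2)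
            = (processLevel graph max_depth filter_substring v r [] (node :: rest) d).2.1 := by
          refine (bfsLoopA_congr graph max_depth filter_substring univ hg rfl rfl
              (show ((processLevel graph max_depth filter_substring v r [] (node :: rest) d).2.2).map
                  (fun n => (n, d + 1)) = ([] : List (String × Int)) by rw [h2]; rfl)
              _ (by intro q hqq; simp at hqq)).trans ?_
          rw [bfsLoopA.eq_def]
        have hR : bfsLoopB graph max_depth filter_substring univ hg
            (processLevel graph max_depth filter_substring v r [] (node :: rest) d).1
            (processLevel graph max_depth filter_substring v r [] (node :: rest) d).2.1
            (processLevel graph max_depth filter_substring v r [] (node :: rest) d).2.2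
            (d + 1) (processLevel_frontier_mem graph max_depth filter_substring univ hg (node :: rest)
              v r [] d (by intro x hx; simp at hx))
            = (processLevel graph max_depth filter_substring v r [] (node :: rest) d).2.1 := by
          refine (bfsLoopB_congr graph max_depth filter_substring univ hg (d + 1) rfl rfl h2
              _ (by intro n hn; simp at hn)).trans ?_
          rw [bfsLoopB.eq_def]
        rw [hL, hR]
      · exact ih (pvUnvisited univ (processLevel graph max_depth filter_substring v r [] (node :: rest) d).1)
          (hc ▸ hlt) _ rfl _ _ (d + 1) (pvQmem1 univ _ (d + 1) hT2) hT2

-- ===== VERDICT (by name: the statement is the Claim_ definition above) =====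
theorem bfs_dependencies_spec : Claim_equal_bfs_dependencies := by
  intro graph start_pkg max_depth filter_substring _
  unfold Spec_bfs_dependencies bfs_dependencies bfs_dependencies_alt
  exact pvMain graph max_depth filter_substring _ (pvUnivHG graph start_pkg) _ _ rfl
    [start_pkg] [] 0 _ _
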